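-- pv_equiv track=rewrite | github.com/NotJona/PracticalMachineLearningForNLP | functions.py | assign_disagree_bin
-- ===== SOURCE A (Python) =====
-- def assign_disagree_bin(item, is_test=False):
--     """
--     takes a tweet and its annotations (if available) and predicts 1 if there is a disagreement between annotators on 0-Kein versus all other labels and 0 otherwise.
--     :param item: dictionary of the form {'id': , 'text': , 'annotators': }
--     :param is_test: Boolean. If False annotations are available. If True not
--     :return: label
--     """
--     if not is_test:
--         labels = [ann['label'] for ann in item['annotations']]
--         unique_labels = set(labels)
--         disagree_bin_label = 1 if '0-Kein' in unique_labels and len(unique_labels) > 1 else 0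
--     else:
--         disagree_bin_label = None
--     return disagree_bin_label
-- ===== SOURCE B (Python) =====
-- def assign_disagree_bin(item, is_test=False):
--     """
--     takes a tweet and its annotations (if available) and predicts 1 if there is a disagreement between annotators on 0-Kein versus all other labels and 0 otherwise.
--     """
--     if is_test:
--         return None
--     saw_kein = False
--     saw_other = False
--     for ann in item['annotations']:
--         if ann['label'] == '0-Kein':
--             saw_kein = True
--         else:
--             saw_other = True
--         if saw_kein and saw_other:
--             break
--     return 1 if saw_kein and saw_other else 0
-- ===== Notes on version B (the rewrite author's own statement) =====
-- stated objective: simpler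
-- what changed: Replaces the materialized label list + set + membership/size test with a single early-exit scan maintaining two boolean flags (saw '0-Kein', saw another label).
import Mathlib
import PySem

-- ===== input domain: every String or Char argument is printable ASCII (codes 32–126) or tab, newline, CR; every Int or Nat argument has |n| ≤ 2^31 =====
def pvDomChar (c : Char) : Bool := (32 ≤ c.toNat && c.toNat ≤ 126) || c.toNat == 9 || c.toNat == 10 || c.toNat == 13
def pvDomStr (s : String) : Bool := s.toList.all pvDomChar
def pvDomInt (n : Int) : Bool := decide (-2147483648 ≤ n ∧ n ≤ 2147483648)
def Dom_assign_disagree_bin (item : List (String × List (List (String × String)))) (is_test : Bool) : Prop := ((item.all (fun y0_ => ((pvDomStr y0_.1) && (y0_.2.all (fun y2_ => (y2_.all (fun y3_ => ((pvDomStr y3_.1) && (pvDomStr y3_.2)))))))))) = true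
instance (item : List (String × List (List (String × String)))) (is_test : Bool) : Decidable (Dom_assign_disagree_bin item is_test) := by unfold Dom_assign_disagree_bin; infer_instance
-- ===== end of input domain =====

-- B replaces A's materialized label list + set + membership/size test by a single
-- early-exit scan maintaining two boolean flags (objective: simpler).

-- ===== PORT A =====
-- item['annotations'] / ann['label'] (KeyError excluded by Pre_; total via getD)
def assign_disagree_bin (item : List (String × List (List (String × String)))) (is_test : Bool) : Option Int :=
  if !is_test then
    let labels := ((PySem.Dict.get? (PySem.Dict.mk item) "annotations").getD []).map
      (fun ann => (PySem.Dict.get? (PySem.Dict.mk ann) "label").getD "")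
    let unique_labels := PySem.Set.ofList labels
    some (if PySem.Set.contains unique_labels "0-Kein" && decide (1 < unique_labels.length) then 1 else 0)
  else
    none

-- ===== PORT B =====
-- the for-loop of Source B with its early break, as structural recursion on the annotation list
def pvAltLoop : List (List (String × String)) → Bool → Bool → Bool × Bool
  | [], saw_kein, saw_other => (saw_kein, saw_other)
  | ann :: rest, saw_kein, saw_other =>
    let k := if (PySem.Dict.get? (PySem.Dict.mk ann) "label").getD "" == "0-Kein" then true else saw_kein
    let o := if (PySem.Dict.get? (PySem.Dict.mk ann) "label").getD "" == "0-Kein" then saw_other else true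
    if k && o then (k, o) else pvAltLoop rest k o

def assign_disagree_bin_alt (item : List (String × List (List (String × String)))) (is_test : Bool) : Option Int :=
  if is_test then
    none
  else
    let p := pvAltLoop ((PySem.Dict.get? (PySem.Dict.mk item) "annotations").getD []) false false
    some (if p.1 && p.2 then 1 else 0)

-- ===== PRECONDITION & SPEC =====
-- Pre_ excludes exactly the inputs on which A raises KeyError: with annotations required
-- (is_test = false), item must carry the key 'annotations' and every annotation the key 'label'.
def Pre_assign_disagree_bin (item : List (String × List (List (String × String)))) (is_test : Bool) : Prop :=
  is_test = true ∨
    ((PySem.Dict.get? (PySem.Dict.mk item) "annotations").isSome = true ∧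
      ∀ ann ∈ (PySem.Dict.get? (PySem.Dict.mk item) "annotations").getD [],
        (PySem.Dict.get? (PySem.Dict.mk ann) "label").isSome = true)
instance (item : List (String × List (List (String × String)))) (is_test : Bool) : Decidable (Pre_assign_disagree_bin item is_test) := by unfold Pre_assign_disagree_bin; infer_instance

def pvWitness_assign_disagree_bin : (List (String × List (List (String × String)))) × Bool :=
  ([("annotations", [[("label", "0-Kein")], [("label", "1-Etwas")]])], false)

def Spec_assign_disagree_bin (item : List (String × List (List (String × String)))) (is_test : Bool) (out : Option Int) : Prop := out = assign_disagree_bin_alt item is_test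
instance (item : List (String × List (List (String × String)))) (is_test : Bool) (out : Option Int) : Decidable (Spec_assign_disagree_bin item is_test out) := by unfold Spec_assign_disagree_bin; infer_instance

-- ===== CLAIM (what is proved, stated in full; the proofs are below) =====
def Claim_equal_assign_disagree_bin : Prop := ∀ (item : List (String × List (List (String × String)))) (is_test : Bool), Dom_assign_disagree_bin item is_test → Pre_assign_disagree_bin item is_test → Spec_assign_disagree_bin item is_test (assign_disagree_bin item is_test)

-- ===== LEMMAS AND PROOFS =====

-- closed form of B's loop: each flag is an ∃-scan over the remaining annotations
theorem pvAltLoop_closed (l : List (List (String × String))) (k o : Bool) :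
    pvAltLoop l k o =
      (k || l.any (fun ann => (PySem.Dict.get? (PySem.Dict.mk ann) "label").getD "" == "0-Kein"),
       o || l.any (fun ann => (PySem.Dict.get? (PySem.Dict.mk ann) "label").getD "" != "0-Kein")) := by
  induction l generalizing k o with
  | nil => simp [pvAltLoop]
  | cons ann rest ih =>
    simp only [pvAltLoop, List.any_cons]
    cases hb : ((PySem.Dict.get? (PySem.Dict.mk ann) "label").getD "" == "0-Kein") <;>
      cases k <;> cases o <;> simp [hb, ih, bne]

-- A's set test equals B's two flags, over the plain label list
theorem pv_core (l : List String) (x : String) :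
    (PySem.Set.contains (PySem.Set.ofList l) x && decide (1 < (PySem.Set.ofList l).length))
      = (l.any (fun y => y == x) && l.any (fun y => y != x)) := by
  rw [Bool.eq_iff_iff]
  simp only [Bool.and_eq_true, List.any_eq_true, beq_iff_eq, bne_iff_ne, decide_eq_true_eq]
  rw [PySem.Set.contains_iff]
  have hnd : (PySem.Set.ofList l).Nodup := PySem.Set.nodup_ofList l
  have hmem : ∀ y, y ∈ PySem.Set.ofList l ↔ y ∈ l := fun y => PySem.Set.mem_ofList l y
  generalize hgen : PySem.Set.ofList l = s at hnd hmem ⊢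
  clear hgen
  constructor
  · rintro ⟨hx, hlen⟩
    rcases s with _ | ⟨a, _ | ⟨b, t⟩⟩
    · simp at hx
    · simp at hlen
    · have hab : a ≠ b := by
        have h1 := (List.nodup_cons.1 hnd).1
        exact fun h => h1 (h ▸ List.mem_cons_self ..)
      have ha : a ∈ l := (hmem a).1 (List.mem_cons_self ..)
      have hb : b ∈ l := (hmem b).1 (List.mem_cons_of_mem _ (List.mem_cons_self ..))
      refine ⟨⟨x, (hmem x).1 hx, rfl⟩, ?_⟩
      by_cases hax : a = x
      · exact ⟨b, hb, fun h => hab (hax.trans h.symm)⟩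
      · exact ⟨a, ha, hax⟩
  · rintro ⟨⟨y, hy, hyx⟩, z, hz, hzx⟩
    subst hyx
    have hxS := (hmem y).2 hy
    have hzS := (hmem z).2 hz
    refine ⟨hxS, ?_⟩
    rcases s with _ | ⟨a, _ | ⟨b, t⟩⟩
    · simp at hxS
    · simp at hxS hzS
      exact absurd (hzS.trans hxS.symm) hzx
    · simp

theorem assign_disagree_bin_main : ∀ (item : List (String × List (List (String × String)))) (is_test : Bool),
    assign_disagree_bin item is_test = assign_disagree_bin_alt item is_test := by
  intro item is_test
  cases is_test with
  | true => simp [assign_disagree_bin, assign_disagree_bin_alt]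
  | false =>
    simp only [assign_disagree_bin, assign_disagree_bin_alt, Bool.not_false, if_true,
      Bool.false_eq_true, if_false]
    rw [pvAltLoop_closed]
    simp only [Bool.false_or]
    rw [pv_core]
    congr 1
    simp [List.any_map, Function.comp]

-- ===== VERDICT (by name: the statement is the Claim_ definition above) =====
theorem assign_disagree_bin_spec : Claim_equal_assign_disagree_bin := by
  intro item is_test _ _
  exact assign_disagree_bin_main item is_test
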